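-- pv_equiv track=rewrite | github.com/pypi-data/pypi-mirror-395 | packages/hotpot-zzy/hotpot_zzy-0.5.2.1-py3-none-any.whl/hotpot/plugins/zeoxx/core.py | _resolve_collision
-- ===== SOURCE A (Python) =====
-- from typing import List, Dict, Optional, Union, Sequence, Tuple, Set, Any
--
-- def _resolve_collision(name: str, existing: Set[str], task: Optional[str] = None) -> str:
--     """
--     Ensure a column name is unique. If collision, append ' [task=...]', and if needed add counters.
--     """
--     base = name
--     if name not in existing:
--         return name
--     if task:
--         name = f"{base} [task={task}]"
--     if name not in existing:
--         return name
--     # Add numbered suffix if still conflicting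
--     i = 2
--     while True:
--         cand = f"{name} #{i}"
--         if cand not in existing:
--             return cand
--         i += 1
-- ===== SOURCE B (Python) =====
-- def _resolve_collision(name, existing, task=None):
--     """Index the taken numeric suffixes of the colliding name once, then count
--     upward to the first free suffix (instead of probing full candidate names)."""
--     if name not in existing:
--         return name
--     if task:
--         name = f"{name} [task={task}]"
--         if name not in existing:
--             return name
--     prefix = f"{name} #"
--     taken = {e[len(prefix):] for e in existing if e.startswith(prefix)}
--     i = 2
--     while str(i) in taken:
--         i += 1
--     return f"{prefix}{i}"
-- ===== Notes on version B (the rewrite author's own statement) =====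
-- stated objective: alternative
-- what changed: Instead of A's while-loop that formats each numbered candidate and probes it against the whole existing set, B scans existing once to index the suffixes already taken behind 'name #' and then counts upward to the first free number against that small index.
import Mathlib
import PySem

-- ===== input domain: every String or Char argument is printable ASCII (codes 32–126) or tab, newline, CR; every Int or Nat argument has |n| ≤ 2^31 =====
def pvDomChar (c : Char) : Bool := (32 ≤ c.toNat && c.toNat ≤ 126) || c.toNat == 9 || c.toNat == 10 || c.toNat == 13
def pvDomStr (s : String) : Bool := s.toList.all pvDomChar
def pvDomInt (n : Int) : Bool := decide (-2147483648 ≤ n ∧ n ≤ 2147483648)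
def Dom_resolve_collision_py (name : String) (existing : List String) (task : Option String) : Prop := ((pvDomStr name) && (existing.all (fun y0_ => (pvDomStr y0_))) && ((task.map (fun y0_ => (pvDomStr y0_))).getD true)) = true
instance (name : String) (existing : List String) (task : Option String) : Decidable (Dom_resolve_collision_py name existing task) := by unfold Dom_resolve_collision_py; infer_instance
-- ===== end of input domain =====

-- ===== PORT A =====
-- B replaces A's candidate-probing while-loop (build "name #i" and test it against the whole
-- set for i = 2, 3, …) by a one-pass index of the suffixes already taken behind "name #",
-- followed by integer counting against that index; equivalence is proved on all inputs.

-- A's while-loop: try "name1 #i", i = 2, 3, ...; fuel = existing.length + 1 always suffices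
-- (pigeonhole: the numbered candidates are pairwise distinct), the fuel-0 branch is unreachable.
def pvLoopA (existing : List String) (name1 : String) : Nat → Int → String
  | 0, i => name1 ++ " #" ++ PySem.Int.toStr i
  | fuel+1, i =>
      let cand := name1 ++ " #" ++ PySem.Int.toStr i
      if existing.contains cand then pvLoopA existing name1 fuel (i+1) else cand

def resolve_collision_py (name : String) (existing : List String) (task : Option String) : String :=
  if !existing.contains name then name
  else
    let name1 := match task with
      | some t => if t ≠ "" then name ++ " [task=" ++ t ++ "]" else name
      | none => name
    if !existing.contains name1 then name1
    else pvLoopA existing name1 (existing.length + 1) 2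

-- ===== PORT B =====
-- transliteration of Source B: the set comprehension {e[len(prefix):] for e in existing if
-- e.startswith(prefix)} builds the suffix index; the counting while-loop gets fuel
-- taken.length + 1, which always suffices (pigeonhole: str(2), str(3), … are distinct),
-- so its fuel-0 branch is unreachable.
def pvTakenOf (existing : List String) (pre : String) : PySem.Set String :=
  PySem.Set.ofList (existing.filterMap (fun e =>
    if PySem.Str.startswith e pre then some (PySem.Str.slice e (some (PySem.Str.len pre)) none) else none))

-- while str(i) in taken: i += 1
def pvLoopB (taken : List String) : Nat → Int → Int
  | 0, i => i
  | fuel+1, i => if taken.contains (PySem.Int.toStr i) then pvLoopB taken fuel (i+1) else i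

def pvTailB (existing : List String) (name : String) : String :=
  let pre := name ++ " #"
  let taken := pvTakenOf existing pre
  pre ++ PySem.Int.toStr (pvLoopB taken (taken.length + 1) 2)

def resolve_collision_py_alt (name : String) (existing : List String) (task : Option String) : String :=
  if !existing.contains name then name
  else
    match task with
    | some t =>
        if t ≠ "" then
          let name1 := name ++ " [task=" ++ t ++ "]"
          if !existing.contains name1 then name1 else pvTailB existing name1
        else pvTailB existing name
    | none => pvTailB existing name

-- ===== PRECONDITION & SPEC =====
def Spec_resolve_collision_py (name : String) (existing : List String) (task : Option String) (out : String) : Prop := out = resolve_collision_py_alt name existing task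
instance (name : String) (existing : List String) (task : Option String) (out : String) : Decidable (Spec_resolve_collision_py name existing task out) := by unfold Spec_resolve_collision_py; infer_instance

-- ===== CLAIM (what is proved, stated in full; the proofs are below) =====
def Claim_equal_resolve_collision_py : Prop := ∀ (name : String) (existing : List String) (task : Option String), Dom_resolve_collision_py name existing task → Spec_resolve_collision_py name existing task (resolve_collision_py name existing task)

-- ===== LEMMAS AND PROOFS =====

-- digitChar is injective on decimal digits
lemma pv_digitChar_inj : ∀ a < 10, ∀ b < 10, Nat.digitChar a = Nat.digitChar b → a = b := by decide

-- Nat.toDigitsCore in terms of Nat.digits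
lemma pv_tdc : ∀ (f n : Nat) (acc : List Char), n ≤ f →
    Nat.toDigitsCore 10 (f + 1) n acc =
      (Nat.digits 10 n).reverse.map Nat.digitChar ++ (if n = 0 then '0' :: acc else acc) := by
  intro f
  induction f with
  | zero =>
    intro n acc h
    have hn : n = 0 := Nat.le_zero.mp h
    subst hn
    simp [Nat.toDigitsCore]
    decide
  | succ f ih =>
    intro n acc h
    by_cases h0 : n / 10 = 0
    · have hlt : n < 10 := by omega
      by_cases hz : n = 0
      · subst hz
        simp [Nat.toDigitsCore]
        decide
      · have : Nat.digits 10 n = [n % 10] := by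
          rw [Nat.digits_def' (by norm_num) (Nat.pos_of_ne_zero hz), Nat.mod_eq_of_lt hlt, h0]
          simp
        simp [Nat.toDigitsCore, h0, this, hz]
    · have hz : n ≠ 0 := by omega
      have hd : n / 10 ≤ f := by omega
      have : Nat.toDigitsCore 10 (f + 1 + 1) n acc
          = Nat.toDigitsCore 10 (f + 1) (n / 10) (Nat.digitChar (n % 10) :: acc) := by
        conv_lhs => rw [Nat.toDigitsCore]
        simp [h0]
      rw [this, ih _ _ hd,
        Nat.digits_def' (b := 10) (by norm_num) (Nat.pos_of_ne_zero hz)]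
      simp [hz, h0, List.append_assoc]

-- mapping digitChar over lists of decimal digits is injective
lemma pv_map_digitChar_inj : ∀ (l1 l2 : List Nat), (∀ x ∈ l1, x < 10) → (∀ x ∈ l2, x < 10) →
    l1.map Nat.digitChar = l2.map Nat.digitChar → l1 = l2 := by
  intro l1
  induction l1 with
  | nil => intro l2 _ _ h; cases l2 <;> simp_all
  | cons a t ih =>
    intro l2 h1 h2 h
    cases l2 with
    | nil => simp_all
    | cons b t2 =>
      simp only [List.map_cons, List.cons.injEq] at h
      have ha := pv_digitChar_inj a (h1 a (by simp)) b (h2 b (by simp)) h.1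
      have := ih t2 (fun x hx => h1 x (by simp [hx])) (fun x hx => h2 x (by simp [hx])) h.2
      simp [ha, this]

-- Nat.toDigits 10 is injective on positive naturals
lemma pv_toDigits_inj (a b : Nat) (ha : 0 < a) (hb : 0 < b)
    (h : Nat.toDigits 10 a = Nat.toDigits 10 b) : a = b := by
  unfold Nat.toDigits at h
  have hA : ¬ a = 0 := by omega
  have hB : ¬ b = 0 := by omega
  rw [pv_tdc a a [] le_rfl, pv_tdc b b [] le_rfl, if_neg hA, if_neg hB,
    List.append_nil, List.append_nil] at h
  have := pv_map_digitChar_inj _ _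
    (fun x hx => Nat.digits_lt_base (by norm_num) (List.mem_reverse.mp hx))
    (fun x hx => Nat.digits_lt_base (by norm_num) (List.mem_reverse.mp hx)) h
  have := List.reverse_inj.mp this
  exact Nat.digits_inj_iff.mp this

-- PySem.Int.toStr is injective on positive ints
lemma pv_toStr_inj (a b : Int) (ha : 1 ≤ a) (hb : 1 ≤ b)
    (h : PySem.Int.toStr a = PySem.Int.toStr b) : a = b := by
  unfold PySem.Int.toStr PySem.Int.toChars at h
  rw [if_neg (by omega), if_neg (by omega)] at h
  have hc : Nat.toDigits 10 a.toNat = Nat.toDigits 10 b.toNat := by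
    have := congrArg String.toList h
    simpa using this
  have := pv_toDigits_inj a.toNat b.toNat (by omega) (by omega) hc
  omega

-- generic pigeonhole: among S.length + 1 values g a, …, g (a + S.length) of a map injective
-- beyond a, one is missing from S
lemma pv_pigeon (S : List String) (g : Int → String) (a : Int)
    (hg : ∀ x y, a ≤ x → a ≤ y → g x = g y → x = y) :
    ∃ j ∈ PySem.List.pyRange a (a + (S.length + 1 : Nat)) 1, S.contains (g j) = false := by
  by_contra hno
  simp only [not_exists, not_and] at hno
  set rng := PySem.List.pyRange a (a + (S.length + 1 : Nat)) 1 with hrng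
  have hsub : rng.map g ⊆ S := by
    intro c hc
    obtain ⟨j, hj, rfl⟩ := List.mem_map.mp hc
    have := hno j hj
    cases hcon : S.contains (g j)
    · exact absurd hcon this
    · exact List.contains_iff_mem.mp hcon
  have hnd : (rng.map g).Nodup := by
    apply List.Nodup.map_on _ (PySem.List.nodup_pyRange_one _ _)
    intro x hx y hy hxy
    have hx2 := (PySem.List.mem_pyRange_one.mp hx).1
    have hy2 := (PySem.List.mem_pyRange_one.mp hy).1
    exact hg x y hx2 hy2 hxy
  have hlen : (rng.map g).length = S.length + 1 := by
    rw [List.length_map, hrng, PySem.List.length_pyRange_one]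
    omega
  have h1 : (rng.map g).toFinset.card = S.length + 1 := by
    rw [List.toFinset_card_of_nodup hnd, hlen]
  have h2 : (rng.map g).toFinset ⊆ S.toFinset := by
    intro x hx
    exact List.mem_toFinset.mpr (hsub (List.mem_toFinset.mp hx))
  have h3 := Finset.card_le_card h2
  have h4 := List.toFinset_card_le S
  omega

-- A's while-loop returns the candidate of the first index the window's find? returns
lemma pv_loopA_find (existing : List String) (name1 : String) :
    ∀ (fuel : Nat) (i j : Int),
      (PySem.List.pyRange i (i + fuel) 1).find?
          (fun j => !existing.contains (name1 ++ " #" ++ PySem.Int.toStr j)) = some j →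
      pvLoopA existing name1 fuel i = name1 ++ " #" ++ PySem.Int.toStr j := by
  intro fuel
  induction fuel with
  | zero =>
    intro i j h
    rw [PySem.List.pyRange_one_eq_nil (by omega)] at h
    simp at h
  | succ fuel ih =>
    intro i j h
    have hcons : PySem.List.pyRange i (i + (fuel + 1 : Nat)) 1
        = i :: PySem.List.pyRange (i + 1) ((i + 1) + fuel) 1 := by
      rw [PySem.List.pyRange_one_cons (by omega)]
      have : i + (fuel + 1 : Nat) = (i + 1) + fuel := by push_cast; ring
      rw [this]
    rw [hcons] at h
    simp only [List.find?] at h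
    by_cases hc : existing.contains (name1 ++ " #" ++ PySem.Int.toStr i)
    · rw [hc] at h
      simp only [Bool.not_true] at h
      simp only [pvLoopA, hc, if_true]
      exact ih (i + 1) j h
    · simp only [Bool.not_eq_true] at hc
      rw [hc] at h
      simp only [Bool.not_false] at h
      simp only [pvLoopA, hc, Bool.false_eq_true, if_false]
      simp only [Option.some.injEq] at h
      rw [h]

-- B's while-loop returns the first index the window's find? returns
lemma pv_loopB_find (taken : List String) :
    ∀ (fuel : Nat) (i j : Int),
      (PySem.List.pyRange i (i + fuel) 1).find?
          (fun j => !taken.contains (PySem.Int.toStr j)) = some j →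
      pvLoopB taken fuel i = j := by
  intro fuel
  induction fuel with
  | zero =>
    intro i j h
    rw [PySem.List.pyRange_one_eq_nil (by omega)] at h
    simp at h
  | succ fuel ih =>
    intro i j h
    have hcons : PySem.List.pyRange i (i + (fuel + 1 : Nat)) 1
        = i :: PySem.List.pyRange (i + 1) ((i + 1) + fuel) 1 := by
      rw [PySem.List.pyRange_one_cons (by omega)]
      have : i + (fuel + 1 : Nat) = (i + 1) + fuel := by push_cast; ring
      rw [this]
    rw [hcons] at h
    simp only [List.find?] at h
    by_cases hc : taken.contains (PySem.Int.toStr i)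
    · rw [hc] at h
      simp only [Bool.not_true] at h
      simp only [pvLoopB, hc, if_true]
      exact ih (i + 1) j h
    · simp only [Bool.not_eq_true] at hc
      rw [hc] at h
      simp only [Bool.not_false, Option.some.injEq] at h
      simp only [pvLoopB, hc, Bool.false_eq_true, if_false]
      rw [h]

-- membership in B's suffix index ↔ membership of the full candidate in existing
lemma pv_mem_taken (existing : List String) (pre : String) (s : String) :
    List.contains (pvTakenOf existing pre) s = List.contains existing (pre ++ s) := by
  have hiff : (s ∈ pvTakenOf existing pre) ↔ (pre ++ s) ∈ existing := by
    unfold pvTakenOf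
    rw [PySem.Set.mem_ofList, List.mem_filterMap]
    constructor
    · rintro ⟨e, he, hfe⟩
      by_cases hsw : PySem.Str.startswith e pre
      · rw [if_pos hsw] at hfe
        have hpref : pre.toList <+: e.toList := by
          have := hsw
          rw [PySem.Str.startswith_eq, PySem.Chars.startswith_iff] at this
          exact this
        obtain ⟨t, ht⟩ := hpref
        have hslice : (PySem.Str.slice e (some (PySem.Str.len pre)) none).toList = t := by
          simp only [PySem.Str.toList_slice, PySem.Chars.slice_eq_listSlice, PySem.Str.len_eq]
          rw [PySem.List.slice_from_natCast]
          rw [← ht]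
          simp
        have hst : s.toList = t := by
          have h2 := Option.some.inj hfe
          rw [← h2, hslice]
        have : e = pre ++ s := by
          apply String.toList_inj.mp
          rw [String.toList_append, ← ht, hst]
        rw [← this]
        exact he
      · rw [if_neg hsw] at hfe
        exact absurd hfe (by simp)
    · intro he
      refine ⟨pre ++ s, he, ?_⟩
      have hsw : PySem.Str.startswith (pre ++ s) pre = true := by
        rw [PySem.Str.startswith_eq, PySem.Chars.startswith_iff, String.toList_append]
        exact List.prefix_append _ _
      rw [if_pos hsw, Option.some.injEq]
      apply String.toList_inj.mp
      simp only [PySem.Str.toList_slice, PySem.Chars.slice_eq_listSlice, PySem.Str.len_eq]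
      rw [PySem.List.slice_from_natCast, String.toList_append]
      simp
  rw [Bool.eq_iff_iff, List.contains_iff_mem, List.contains_iff_mem]
  exact hiff

-- find? over a window that already succeeds is unchanged by extending the window
lemma pv_find_extend {p : Int → Bool} (a : Int) (n m : Nat) (j : Int) (hnm : n ≤ m)
    (h : (PySem.List.pyRange a (a + n) 1).find? p = some j) :
    (PySem.List.pyRange a (a + m) 1).find? p = some j := by
  have hsplit : PySem.List.pyRange a (a + m) 1
      = PySem.List.pyRange a (a + n) 1 ++ PySem.List.pyRange (a + n) (a + m) 1 :=
    PySem.List.pyRange_one_append a (a + n) (a + m) (by omega) (by omega)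
  rw [hsplit, List.find?_append, h]
  rfl

-- the two loops agree: B's indexed count names the same candidate as A's probe loop
lemma pv_tail_eq (existing : List String) (name1 : String) :
    pvTailB existing name1 = pvLoopA existing name1 (existing.length + 1) 2 := by
  have hpeq : (fun j => !List.contains (pvTakenOf existing (name1 ++ " #")) (PySem.Int.toStr j))
      = (fun j => !existing.contains (name1 ++ " #" ++ PySem.Int.toStr j)) := by
    funext j
    rw [pv_mem_taken existing (name1 ++ " #") (PySem.Int.toStr j)]
  set p : Int → Bool := fun j => !existing.contains (name1 ++ " #" ++ PySem.Int.toStr j) with hp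
  set taken := pvTakenOf existing (name1 ++ " #") with htaken
  -- existence of a free index in each window
  have hexA : ∃ j ∈ PySem.List.pyRange 2 (2 + (existing.length + 1 : Nat)) 1, p j = true := by
    obtain ⟨j, hj, hf⟩ := pv_pigeon existing (fun j => name1 ++ " #" ++ PySem.Int.toStr j) 2
      (fun x y hx hy hxy => by
        have hxy' : name1 ++ " #" ++ PySem.Int.toStr x = name1 ++ " #" ++ PySem.Int.toStr y := hxy
        rw [String.append_assoc, String.append_assoc] at hxy'
        have h2 := (String.append_right_inj name1).mp hxy'
        have h3 := (String.append_right_inj " #").mp h2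
        exact pv_toStr_inj x y (by omega) (by omega) h3)
    refine ⟨j, hj, ?_⟩
    have hf' : existing.contains (name1 ++ " #" ++ PySem.Int.toStr j) = false := hf
    rw [hp]
    simp only [hf', Bool.not_false]
  have hexB : ∃ j ∈ PySem.List.pyRange 2 (2 + (taken.length + 1 : Nat)) 1, p j = true := by
    obtain ⟨j, hj, hf⟩ := pv_pigeon taken (fun j => PySem.Int.toStr j) 2
      (fun x y hx hy hxy => pv_toStr_inj x y (by omega) (by omega) hxy)
    refine ⟨j, hj, ?_⟩
    have hf' : List.contains taken (PySem.Int.toStr j) = false := hf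
    rw [← hpeq]
    simp only [hf', Bool.not_false]
  -- find? over each window succeeds
  obtain ⟨jA, hjA⟩ := Option.isSome_iff_exists.mp (List.find?_isSome.mpr hexA)
  obtain ⟨jB, hjB⟩ := Option.isSome_iff_exists.mp (List.find?_isSome.mpr hexB)
  -- both extend to the common window, so the indices agree
  have hA' := pv_find_extend 2 (existing.length + 1) (existing.length + taken.length + 2) jA
    (by omega) hjA
  have hB' := pv_find_extend 2 (taken.length + 1) (existing.length + taken.length + 2) jB
    (by omega) hjB
  have hjAB : jA = jB := by
    rw [hA'] at hB'
    exact Option.some.inj hB'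
  have hloopA := pv_loopA_find existing name1 (existing.length + 1) 2 jA hjA
  have hloopB := pv_loopB_find taken (taken.length + 1) 2 jB (by rw [hpeq]; exact hjB)
  show (name1 ++ " #") ++ PySem.Int.toStr (pvLoopB taken (taken.length + 1) 2)
      = pvLoopA existing name1 (existing.length + 1) 2
  rw [hloopA, hloopB, hjAB, String.append_assoc]

-- ===== VERDICT (by name: the statement is the Claim_ definition above) =====
theorem resolve_collision_py_spec : Claim_equal_resolve_collision_py := by
  intro name existing task _
  unfold Spec_resolve_collision_py resolve_collision_py resolve_collision_py_alt
  match task with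
  | none => by_cases h0 : name ∈ existing <;> simp [h0, pv_tail_eq]
  | some t =>
    by_cases h0 : name ∈ existing
    · by_cases ht : t = ""
      · simp [ht, h0, pv_tail_eq]
      · by_cases h1 : (name ++ " [task=" ++ t ++ "]") ∈ existing <;>
          simp [ht, h0, h1, pv_tail_eq]
    · simp [h0]
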